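-- pv_equiv track=rewrite | github.com/luiswally/Advent-Of-Code-2023 | Day 2/day2.py | minPower
-- ===== SOURCE A (Python) =====
-- def minPower(sets):
--     cubes = [0, 0, 0]
--
--     for set in sets:
--         red = set[0]
--         green = set[1]
--         blue = set[2]
--
--         if red >= cubes[0]:
--             cubes[0] = red
--         if green >= cubes[1]:
--             cubes[1] = green
--         if blue >= cubes[2]:
--             cubes[2] = blue
--
--     return cubes[0] * cubes[1] * cubes[2]
-- ===== SOURCE B (Python) =====
-- def minPower(sets):
--     def colmax(xs):
--         # component-wise maximum of xs, floored at 0, by divide and conquer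
--         if not xs:
--             return (0, 0, 0)
--         if len(xs) == 1:
--             s = xs[0]
--             return (max(0, s[0]), max(0, s[1]), max(0, s[2]))
--         mid = len(xs) // 2
--         a = colmax(xs[:mid])
--         b = colmax(xs[mid:])
--         return (max(a[0], b[0]), max(a[1], b[1]), max(a[2], b[2]))
--
--     r, g, b = colmax(sets)
--     return r * g * b
-- ===== Notes on version B (the rewrite author's own statement) =====
-- stated objective: alternative
-- what changed: Replaces A's single left-to-right loop over a running cubes triple with a recursive divide-and-conquer: the list is split in half, each half's 0-floored component-wise maximum triple is computed recursively and the halves are merged by pairwise max, then the three maxima are multiplied.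
import Mathlib
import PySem

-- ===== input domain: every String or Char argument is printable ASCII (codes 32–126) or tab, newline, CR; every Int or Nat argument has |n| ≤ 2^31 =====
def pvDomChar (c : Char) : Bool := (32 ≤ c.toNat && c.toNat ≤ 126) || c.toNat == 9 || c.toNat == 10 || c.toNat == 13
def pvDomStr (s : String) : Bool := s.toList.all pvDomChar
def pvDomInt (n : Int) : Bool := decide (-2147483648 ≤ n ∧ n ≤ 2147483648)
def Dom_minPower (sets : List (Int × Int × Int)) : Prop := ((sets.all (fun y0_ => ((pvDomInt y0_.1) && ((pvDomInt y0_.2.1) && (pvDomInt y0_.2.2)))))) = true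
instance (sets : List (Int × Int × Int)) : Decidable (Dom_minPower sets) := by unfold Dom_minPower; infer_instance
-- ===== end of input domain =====

-- B replaces A's single running-triple loop with a divide-and-conquer recursion: split the
-- list in half, recursively take each half's 0-floored component-wise max triple, merge by
-- pairwise max, multiply; objective: alternative (same O(n) cost, different algorithm shape).

-- ===== PORT A =====
-- A's loop: running triple cubes, each component conditionally overwritten with >=.
def minPower (sets : List (Int × Int × Int)) : Int :=
  let cubes := sets.foldl (fun (c : Int × Int × Int) s =>
    let red := s.1
    let green := s.2.1
    let blue := s.2.2
    let c0 := if red ≥ c.1 then red else c.1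
    let c1 := if green ≥ c.2.1 then green else c.2.1
    let c2 := if blue ≥ c.2.2 then blue else c.2.2
    (c0, c1, c2)) ((0 : Int), (0 : Int), (0 : Int))
  cubes.1 * cubes.2.1 * cubes.2.2

-- ===== PORT B =====
-- colmax: divide-and-conquer 0-floored component-wise maximum; xs[:mid]/xs[mid:] become
-- List.take/List.drop (exact for nonnegative in-range slice bounds), xs[0] becomes headD
-- (the branch guarantees nonemptiness).
def colmaxB (xs : List (Int × Int × Int)) : Int × Int × Int :=
  if h0 : xs = [] then (0, 0, 0)
  else if h1 : xs.length = 1 then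
    let s := xs.headD (0, 0, 0)
    (max 0 s.1, max 0 s.2.1, max 0 s.2.2)
  else
    let mid := xs.length / 2
    let a := colmaxB (xs.take mid)
    let b := colmaxB (xs.drop mid)
    (max a.1 b.1, max a.2.1 b.2.1, max a.2.2 b.2.2)
termination_by xs.length
decreasing_by
  all_goals
    have hlen : 2 ≤ xs.length := by
      rcases xs with _ | ⟨y, _ | ⟨z, zs⟩⟩
      · simp at h0
      · simp at h1
      · simp
  · simp [List.length_take]; omega
  · simp [List.length_drop]; omega

def minPower_alt (sets : List (Int × Int × Int)) : Int :=
  let m := colmaxB sets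
  m.1 * m.2.1 * m.2.2

-- ===== PRECONDITION & SPEC =====
def Spec_minPower (sets : List (Int × Int × Int)) (out : Int) : Prop := out = minPower_alt sets
instance (sets : List (Int × Int × Int)) (out : Int) : Decidable (Spec_minPower sets out) := by unfold Spec_minPower; infer_instance

-- ===== CLAIM (what is proved, stated in full; the proofs are below) =====
def Claim_equal_minPower : Prop := ∀ (sets : List (Int × Int × Int)), Dom_minPower sets → Spec_minPower sets (minPower sets)

-- ===== LEMMAS AND PROOFS =====

-- canonical form: a 0-floored column maximum as a fold
def colFold (f : (Int × Int × Int) → Int) (xs : List (Int × Int × Int)) : Int :=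
  (xs.map f).foldl max 0

theorem le_foldl_max (l : List Int) (a : Int) : a ≤ l.foldl max a := by
  induction l generalizing a with
  | nil => simp
  | cons h t ih => exact le_trans (le_max_left a h) (ih _)

theorem foldl_max_shift (l : List Int) (a b : Int) :
    l.foldl max (max a b) = max a (l.foldl max b) := by
  induction l generalizing b with
  | nil => simp
  | cons h t ih => simp only [List.foldl_cons, max_assoc]; exact ih _

theorem colFold_append (f : (Int × Int × Int) → Int) (l1 l2 : List (Int × Int × Int)) :
    colFold f (l1 ++ l2) = max (colFold f l1) (colFold f l2) := by
  unfold colFold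
  have key : ∀ (a : Int) (l : List Int), 0 ≤ a → l.foldl max a = max a (l.foldl max 0) := by
    intro a l ha
    rw [← foldl_max_shift l a 0, max_eq_left ha]
  rw [List.map_append, List.foldl_append]
  exact key _ _ (le_foldl_max _ 0)

theorem colmaxB_eq (xs : List (Int × Int × Int)) :
    colmaxB xs = (colFold (·.1) xs, colFold (·.2.1) xs, colFold (·.2.2) xs) := by
  generalize hn : xs.length = n
  induction n using Nat.strong_induction_on generalizing xs with
  | _ n ih =>
    rw [colmaxB]
    by_cases h0 : xs = []
    · simp [h0, colFold]
    · by_cases h1 : xs.length = 1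
      · rcases xs with _ | ⟨s, t⟩
        · simp at h0
        · rcases t with _ | ⟨z, zs⟩
          · simp [colFold]
          · simp at h1
      · simp only [h0, dif_neg, h1, not_false_iff]
        have hlen : 2 ≤ xs.length := by
          have : xs.length ≠ 0 := by simpa [List.length_eq_zero_iff] using h0
          omega
        subst hn
        rw [ih (xs.take (xs.length / 2)).length (by simp [List.length_take]; omega)
              (xs.take (xs.length / 2)) rfl,
            ih (xs.drop (xs.length / 2)).length (by simp [List.length_drop]; omega)
              (xs.drop (xs.length / 2)) rfl]
        have hsplit : ∀ f, colFold f xs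
            = max (colFold f (xs.take (xs.length / 2))) (colFold f (xs.drop (xs.length / 2))) := by
          intro f
          conv_lhs => rw [← List.take_append_drop (xs.length / 2) xs]
          exact colFold_append f _ _
        simp only [Prod.mk.injEq]
        exact ⟨(hsplit _).symm, (hsplit _).symm, (hsplit _).symm⟩

theorem minPower_fold_eq (sets : List (Int × Int × Int)) :
    ∀ (a b c : Int),
      sets.foldl (fun (cu : Int × Int × Int) s =>
        let red := s.1
        let green := s.2.1
        let blue := s.2.2
        let c0 := if red ≥ cu.1 then red else cu.1
        let c1 := if green ≥ cu.2.1 then green else cu.2.1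
        let c2 := if blue ≥ cu.2.2 then blue else cu.2.2
        (c0, c1, c2)) (a, b, c)
      = ((sets.map (·.1)).foldl max a,
         (sets.map (·.2.1)).foldl max b,
         (sets.map (·.2.2)).foldl max c) := by
  induction sets with
  | nil => intro a b c; simp
  | cons h t ih =>
    intro a b c
    have hmax : ∀ x y : Int, (if x ≥ y then x else y) = max y x := by
      intro x y; rcases le_total y x with h | h <;> simp [h]; omega
    simp only [List.foldl_cons, List.map_cons, hmax]
    exact ih _ _ _

-- ===== VERDICT (by name: the statement is the Claim_ definition above) =====
theorem minPower_spec : Claim_equal_minPower := by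
  intro sets _
  unfold Spec_minPower minPower minPower_alt
  rw [minPower_fold_eq, colmaxB_eq]
  simp [colFold]
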